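-- pv_equiv track=rewrite | github.com/kumarashutosh22/Python | aoc/aoc_day_5.py | cdcdr
-- ===== SOURCE A (Python) =====
-- def cdcdr(ele,cols=list(range(8))):
--
--   if len(ele)==0:
--     return cols[0]
--
--   else:
--     if ele[0]=='L':
--
--       cols = cols[:int(len(cols)/2)]
--
--       return cdcdr(ele[1:],cols)
--     else:
--
--       cols = cols[int(len(cols)/2):]
--
--       return cdcdr(ele[1:],cols)
-- ===== SOURCE B (Python) =====
-- def cdcdr(ele, cols=list(range(8))):
--     lo, n = 0, len(cols)
--     for ch in ele:
--         half = n // 2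
--         if ch == 'L':
--             n = half
--         else:
--             lo += half
--             n -= half
--     return cols[lo]
-- ===== Notes on version B (the rewrite author's own statement) =====
-- stated objective: faster
-- what changed: Replaced the recursion that copies a half of the list and the tail of the string at every step with a single pass over the characters maintaining only the (offset, length) of the surviving segment, indexing the original list once at the end.
import Mathlib
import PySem

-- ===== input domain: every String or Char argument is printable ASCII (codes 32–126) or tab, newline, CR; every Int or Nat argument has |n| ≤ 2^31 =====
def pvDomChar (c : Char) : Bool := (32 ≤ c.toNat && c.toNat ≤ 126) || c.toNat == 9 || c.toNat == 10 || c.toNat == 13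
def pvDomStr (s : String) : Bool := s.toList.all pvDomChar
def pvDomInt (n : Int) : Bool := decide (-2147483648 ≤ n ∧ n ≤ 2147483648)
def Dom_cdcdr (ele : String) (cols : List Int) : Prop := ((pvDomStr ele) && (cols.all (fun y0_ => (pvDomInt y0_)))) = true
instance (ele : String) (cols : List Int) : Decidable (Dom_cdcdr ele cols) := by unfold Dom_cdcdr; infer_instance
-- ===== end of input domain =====

-- B replaces A's slice-copying recursion with a single pass keeping an (offset, length) pair into the original list.
-- ===== PORT A =====
def cdcdrGoA : List Char → List Int → Int
  | [], cols => (PySem.List.pyGet? cols 0).getD 0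
  | c :: rest, cols =>
      if c = 'L' then
        cdcdrGoA rest (PySem.List.slice cols none (some (PySem.Int.floordiv (cols.length : Int) 2)))
      else
        cdcdrGoA rest (PySem.List.slice cols (some (PySem.Int.floordiv (cols.length : Int) 2)) none)

def cdcdr (ele : String) (cols : List Int) : Int := cdcdrGoA ele.toList cols

-- ===== PORT B =====
def cdcdrStep (s : Int × Int) (ch : Char) : Int × Int :=
  let half := PySem.Int.floordiv s.2 2
  if ch = 'L' then (s.1, half) else (s.1 + half, s.2 - half)

def cdcdr_alt (ele : String) (cols : List Int) : Int :=
  let s := ele.toList.foldl cdcdrStep (0, (cols.length : Int))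
  (PySem.List.pyGet? cols s.1).getD 0

-- ===== PRECONDITION & SPEC =====
-- Pre_ excludes exactly the inputs on which A raises IndexError: the iterated halving of the
-- segment length (a pure arithmetic fold over the characters; it computes neither output)
-- must leave a nonempty segment.
def cdcdrLen (l : List Char) (n : Int) : Int :=
  l.foldl (fun n ch => if ch = 'L' then PySem.Int.floordiv n 2 else n - PySem.Int.floordiv n 2) n

def Pre_cdcdr (ele : String) (cols : List Int) : Prop :=
  0 < cdcdrLen ele.toList (cols.length : Int)
instance (ele : String) (cols : List Int) : Decidable (Pre_cdcdr ele cols) := by unfold Pre_cdcdr; infer_instance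

def pvWitness_cdcdr : String × List Int := ("RL", [1, 2, 3, 4])

def Spec_cdcdr (ele : String) (cols : List Int) (out : Int) : Prop := out = cdcdr_alt ele cols
instance (ele : String) (cols : List Int) (out : Int) : Decidable (Spec_cdcdr ele cols out) := by unfold Spec_cdcdr; infer_instance

-- ===== CLAIM (what is proved, stated in full; the proofs are below) =====
def Claim_equal_cdcdr : Prop := ∀ (ele : String) (cols : List Int), Dom_cdcdr ele cols → Pre_cdcdr ele cols → Spec_cdcdr ele cols (cdcdr ele cols)

-- ===== LEMMAS AND PROOFS =====

theorem pvWitness_ok : Dom_cdcdr pvWitness_cdcdr.1 pvWitness_cdcdr.2 ∧ Pre_cdcdr pvWitness_cdcdr.1 pvWitness_cdcdr.2 := by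
  decide

-- the offset component only shifts: fold from (lo, n) = lo + fold from (0, n)
theorem fold_shift (l : List Char) (lo n : Int) :
    l.foldl cdcdrStep (lo, n) =
      (lo + (l.foldl cdcdrStep (0, n)).1, (l.foldl cdcdrStep (0, n)).2) := by
  induction l generalizing lo n with
  | nil => simp
  | cons c rest ih =>
      simp only [List.foldl_cons, cdcdrStep]
      by_cases hc : c = 'L'
      · simp only [hc, ite_true]
        rw [ih]
      · simp only [hc, ite_false]
        rw [ih, ih (0 + PySem.Int.floordiv n 2)]
        simp only [Prod.mk.injEq]
        exact ⟨by ring, trivial⟩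

-- the length component is cdcdrLen, independently of the offset
theorem fold_len (l : List Char) (lo n : Int) :
    (l.foldl cdcdrStep (lo, n)).2 = cdcdrLen l n := by
  induction l generalizing lo n with
  | nil => rfl
  | cons c rest ih =>
      simp only [List.foldl_cons, cdcdrLen, cdcdrStep]
      by_cases hc : c = 'L' <;> simp [hc, ih, cdcdrLen]

-- bounds: starting from (0, n) with 0 ≤ n, the result satisfies 0 ≤ lo, 0 ≤ len, lo + len ≤ n
theorem fold_bounds (l : List Char) (n : Int) (hn : 0 ≤ n) :
    0 ≤ (l.foldl cdcdrStep (0, n)).1 ∧ 0 ≤ (l.foldl cdcdrStep (0, n)).2 ∧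
      (l.foldl cdcdrStep (0, n)).1 + (l.foldl cdcdrStep (0, n)).2 ≤ n := by
  induction l generalizing n with
  | nil => simpa using hn
  | cons c rest ih =>
      have hfd : PySem.Int.floordiv n 2 = n / 2 := PySem.Int.floordiv_eq_ediv_of_pos (by omega)
      by_cases hc : c = 'L'
      · simp only [List.foldl_cons, cdcdrStep, hc, ite_true]
        have hkey := ih (PySem.Int.floordiv n 2) (by rw [hfd]; omega)
        rw [hfd] at hkey ⊢
        refine ⟨hkey.1, hkey.2.1, ?_⟩
        omega
      · simp only [List.foldl_cons, cdcdrStep, hc, ite_false]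
        rw [fold_shift]
        have hkey := ih (n - PySem.Int.floordiv n 2) (by rw [hfd]; omega)
        rw [hfd] at hkey ⊢
        refine ⟨by omega, hkey.2.1, by omega⟩

theorem main_lemma (l : List Char) (cols : List Int)
    (h : 0 < (l.foldl cdcdrStep (0, (cols.length : Int))).2) :
    cdcdrGoA l cols = (PySem.List.pyGet? cols (l.foldl cdcdrStep (0, (cols.length : Int))).1).getD 0 := by
  induction l generalizing cols with
  | nil => rfl
  | cons c rest ih =>
      have hfd : PySem.Int.floordiv ((cols.length : Int)) 2 = ((cols.length / 2 : Nat) : Int) := by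
        exact_mod_cast PySem.Int.floordiv_natCast cols.length 2
      have hkn : cols.length / 2 ≤ cols.length := Nat.div_le_self _ _
      by_cases hc : c = 'L'
      · -- keep the first half
        have hstate : cdcdrStep (0, (cols.length : Int)) c = (0, ((cols.length / 2 : Nat) : Int)) := by
          simp [cdcdrStep, hc]
        have hlen : (((cols.take (cols.length / 2)).length : Nat) : Int) = ((cols.length / 2 : Nat) : Int) := by
          simp [Nat.min_eq_left hkn]
        have h' : 0 < (rest.foldl cdcdrStep (0, ((cols.length / 2 : Nat) : Int))).2 := by
          have h2 := h
          rw [List.foldl_cons, hstate] at h2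
          exact h2
        have ihh := ih (cols.take (cols.length / 2)) (by rw [hlen]; exact h')
        rw [hlen] at ihh
        have hb := fold_bounds rest ((cols.length / 2 : Nat) : Int) (by positivity)
        set r := rest.foldl cdcdrStep (0, ((cols.length / 2 : Nat) : Int)) with hr
        have h1 : 0 ≤ r.1 := hb.1
        have h2 : r.1 < ((cols.length / 2 : Nat) : Int) := by omega
        have hidx : PySem.List.pyGet? (cols.take (cols.length / 2)) r.1 = PySem.List.pyGet? cols r.1 := by
          rw [PySem.List.pyGet?_of_nonneg _ h1, PySem.List.pyGet?_of_nonneg _ h1]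
          exact List.getElem?_take_of_lt (by omega)
        have hslice : PySem.List.slice cols none (some (PySem.Int.floordiv (cols.length : Int) 2)) =
            cols.take (cols.length / 2) := by
          rw [hfd, PySem.List.slice_to_natCast]
        rw [List.foldl_cons, hstate, ← hr]
        show cdcdrGoA (c :: rest) cols = _
        simp only [cdcdrGoA, hc, ite_true]
        rw [hslice, ihh, hidx]
      · -- keep the second half
        have hmn : (((cols.length - cols.length / 2 : Nat) : Nat) : Int) =
            (cols.length : Int) - ((cols.length / 2 : Nat) : Int) := by
          omega
        have hstate : cdcdrStep (0, (cols.length : Int)) c =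
            (0 + ((cols.length / 2 : Nat) : Int), ((cols.length - cols.length / 2 : Nat) : Int)) := by
          simp only [cdcdrStep, hc, ite_false, hfd, hmn]
        have hlen : (((cols.drop (cols.length / 2)).length : Nat) : Int) = ((cols.length - cols.length / 2 : Nat) : Int) := by
          simp [List.length_drop]
        have h' : 0 < (rest.foldl cdcdrStep (0, ((cols.length - cols.length / 2 : Nat) : Int))).2 := by
          have h2 := h
          rw [List.foldl_cons, hstate, fold_shift] at h2
          exact h2
        have ihh := ih (cols.drop (cols.length / 2)) (by rw [hlen]; exact h')
        rw [hlen] at ihh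
        have hb := fold_bounds rest ((cols.length - cols.length / 2 : Nat) : Int) (by positivity)
        set r := rest.foldl cdcdrStep (0, ((cols.length - cols.length / 2 : Nat) : Int)) with hr
        have h1 : 0 ≤ r.1 := hb.1
        have hidx : PySem.List.pyGet? (cols.drop (cols.length / 2)) r.1 =
            PySem.List.pyGet? cols (((cols.length / 2 : Nat) : Int) + r.1) := by
          rw [PySem.List.pyGet?_of_nonneg _ h1, PySem.List.pyGet?_of_nonneg _ (by positivity)]
          rw [List.getElem?_drop]
          congr 1
          omega
        have hslice : PySem.List.slice cols (some (PySem.Int.floordiv (cols.length : Int) 2)) none =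
            cols.drop (cols.length / 2) := by
          rw [hfd, PySem.List.slice_from_natCast]
        rw [List.foldl_cons, hstate, fold_shift, ← hr]
        show cdcdrGoA (c :: rest) cols = _
        simp only [cdcdrGoA, hc, ite_false]
        rw [hslice, ihh, hidx]
        norm_num

-- ===== VERDICT (by name: the statement is the Claim_ definition above) =====
theorem cdcdr_spec : Claim_equal_cdcdr := by
  intro ele cols _ hpre
  unfold Spec_cdcdr cdcdr cdcdr_alt
  have h : 0 < (ele.toList.foldl cdcdrStep (0, (cols.length : Int))).2 := by
    rw [fold_len]; exact hpre
  simpa using main_lemma ele.toList cols h
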